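-- pv_equiv track=rewrite | github.com/oejaramillo/AutoLit | summarize_articles.py | extract_relevant_sections
-- ===== SOURCE A (Python) =====
-- def extract_relevant_sections(text):
--     """
--     Extracts only the most relevant sections from the text.
--     - Stops when the next major section appears.
--     - Prevents extracting unrelated content (e.g., acknowledgments, references).
--     """
--     sections = ["abstract", "introduction", "methodology", "conclusion", "summary"]
--     extracted = []
--     lines = text.split("\n")
--
--     capturing = False
--     for line in lines:
--         clean_line = line.strip().lower()
--
--         if any(sec in clean_line for sec in sections):
--             capturing = True  # Start capturing when a section is found
--             extracted.append(line)  # Include the section title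
--             continue
--
--         if capturing:
--             # Stop capturing if we hit a new major section
--             if any(sec in clean_line for sec in sections) and line not in extracted:
--                 capturing = False
--                 continue
--
--             extracted.append(line)
--
--     return "\n".join(extracted)
-- ===== SOURCE B (Python) =====
-- def extract_relevant_sections(text):
--     """Find the first line mentioning a recognized section keyword and
--     return everything from that line onward (A's capture flag never resets,
--     so its output is exactly the suffix from the first match)."""
--     sections = ["abstract", "introduction", "methodology", "conclusion", "summary"]
--     lines = text.split("\n")
--     for i, line in enumerate(lines):
--         clean = line.strip().lower()
--         if any(sec in clean for sec in sections):
--             return "\n".join(lines[i:])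
--     return ""
-- ===== Notes on version B (the rewrite author's own statement) =====
-- stated objective: simpler
-- what changed: Replaced the capture-flag loop that appends line by line (with a dead stop branch) by find-first-match-then-slice: locate the first keyword line and join the suffix in one step.
import Mathlib
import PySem

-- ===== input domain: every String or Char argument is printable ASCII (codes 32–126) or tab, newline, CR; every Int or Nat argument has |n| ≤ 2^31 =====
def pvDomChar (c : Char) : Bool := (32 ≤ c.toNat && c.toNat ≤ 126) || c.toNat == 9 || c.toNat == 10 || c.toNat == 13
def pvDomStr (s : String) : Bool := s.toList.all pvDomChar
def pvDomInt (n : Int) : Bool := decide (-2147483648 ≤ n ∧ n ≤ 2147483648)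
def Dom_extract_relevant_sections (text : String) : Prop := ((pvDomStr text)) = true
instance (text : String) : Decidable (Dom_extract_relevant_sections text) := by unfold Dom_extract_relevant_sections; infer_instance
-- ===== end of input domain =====

-- B replaces A's capture-flag loop (which appends line by line and has a dead stop branch)
-- by find-first-keyword-line-then-join-the-suffix: simpler decomposition, same values.


-- ===== PORT A =====
def pvSections : List String := ["abstract", "introduction", "methodology", "conclusion", "summary"]

-- "any(sec in line.strip().lower() for sec in sections)"
def pvMatchLine (line : String) : Bool :=
  pvSections.any (fun sec => PySem.Str.isIn sec (PySem.Str.lower (PySem.Str.strip line)))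

-- A's for-loop, state = (capturing, extracted)
def pvALoop : List String → Bool → List String → List String
  | [], _, extracted => extracted
  | line :: rest, capturing, extracted =>
    if pvMatchLine line then
      pvALoop rest true (extracted ++ [line])
    else if capturing then
      if pvMatchLine line && !(extracted.contains line) then
        pvALoop rest false extracted
      else
        pvALoop rest capturing (extracted ++ [line])
    else
      pvALoop rest capturing extracted

def extract_relevant_sections (text : String) : String :=
  PySem.Str.join "\n" (pvALoop ((PySem.Str.split? text "\n").getD []) false [])

-- ===== PORT B =====
-- B's for-loop over enumerate(lines): on the first matching line return "\n".join(lines[i:]),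
-- realized structurally as recursion on the suffix (lines[i:] = line :: rest).
def pvBGo : List String → String
  | [] => ""
  | line :: rest =>
    if pvMatchLine line then PySem.Str.join "\n" (line :: rest) else pvBGo rest

def extract_relevant_sections_alt (text : String) : String :=
  pvBGo ((PySem.Str.split? text "\n").getD [])

-- ===== PRECONDITION & SPEC =====
def Spec_extract_relevant_sections (text : String) (out : String) : Prop := out = extract_relevant_sections_alt text
instance (text : String) (out : String) : Decidable (Spec_extract_relevant_sections text out) := by unfold Spec_extract_relevant_sections; infer_instance

-- ===== CLAIM (what is proved, stated in full; the proofs are below) =====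
def Claim_equal_extract_relevant_sections : Prop := ∀ (text : String), Dom_extract_relevant_sections text → Spec_extract_relevant_sections text (extract_relevant_sections text)

-- ===== LEMMAS AND PROOFS =====

-- once capturing, A appends every remaining line
lemma pvALoop_true (ls : List String) : ∀ ex, pvALoop ls true ex = ex ++ ls := by
  induction ls with
  | nil => intro ex; simp [pvALoop]
  | cons l ls ih =>
    intro ex
    by_cases h : pvMatchLine l = true <;> simp [pvALoop, h, ih]

-- before the first match A keeps the empty accumulator; at the first match the result is the suffix
lemma pvALoop_eq_bGo (ls : List String) :
    PySem.Str.join "\n" (pvALoop ls false []) = pvBGo ls := by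
  induction ls with
  | nil => simp [pvALoop, pvBGo, PySem.Str.join, PySem.Chars.join_nil]
  | cons l ls ih =>
    by_cases h : pvMatchLine l = true
    · simp [pvALoop, pvBGo, h, pvALoop_true]
    · simp [pvALoop, pvBGo, h, ih]

-- ===== VERDICT (by name: the statement is the Claim_ definition above) =====
theorem extract_relevant_sections_spec : Claim_equal_extract_relevant_sections := by
  intro text _
  unfold Spec_extract_relevant_sections extract_relevant_sections extract_relevant_sections_alt
  exact pvALoop_eq_bGo _
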